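-- pv_equiv track=rewrite | github.com/AP-MI-2021/lab-4-Iulia-Antonia | main.py | elemente_concatenate_palindrom
-- ===== SOURCE A (Python) =====
-- def concatenare_elemente(element1, element2):
--     """
--     Concateneaza doua numere. Daca primele cifre din primul numar sunt 0, acestea nu se vor lua
--      in considerare
--     :param element1: primul element pozitiv
--     :param element2: al doilea element pozitiv
--     :return: concatenarea element1 cu element2
--     """
--     rezultat = str(element1) + str(element2)
--     return int(rezultat)
--
-- def is_palindrom(n):
--     """
--     Verifica daca un numar dat este palindrom
--     :param n: numarul natural pe care vrem sa il verificam
--     :return: True - daca n este palindrom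
--              False - daca n nu este palindrom
--     """
--     n = str(n)
--     oglindit = n[::-1]
--     if n == oglindit:
--         return True
--     else:
--         return False
--
-- def elemente_concatenate_palindrom(lista1, lista2):
--     rezultat = []
--     if len(lista1) < len(lista2):
--         dimensiune = len(lista1)
--     else:
--         dimensiune = len(lista2)
--     for pozitie in range(dimensiune):
--         nr_concatenat = concatenare_elemente(lista1[pozitie], lista2[pozitie])
--         if is_palindrom(nr_concatenat):
--             rezultat.append(nr_concatenat)
--     return rezultat
-- ===== SOURCE B (Python) =====
-- def elemente_concatenate_palindrom(lista1, lista2):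
--     rezultat = []
--     for e1, e2 in zip(lista1, lista2):
--         n = int(str(e1) + str(e2))
--         if n < 0:
--             continue  # a negative number is never a palindrome
--         m, rev = n, 0
--         while m > 0:
--             rev = rev * 10 + m % 10
--             m //= 10
--         if rev == n:
--             rezultat.append(n)
--     return rezultat
-- ===== Notes on version B (the rewrite author's own statement) =====
-- stated objective: alternative
-- what changed: The index loop with a min-length computation and list indexing is replaced by a single zip pass over the paired elements, and the string-reversal palindrome test is replaced by an arithmetic digit-reversal loop (rev = rev*10 + m%10; m //= 10) with negatives rejected directly; the concatenated value is still formed with int(str(a)+str(b)).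
import Mathlib
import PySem

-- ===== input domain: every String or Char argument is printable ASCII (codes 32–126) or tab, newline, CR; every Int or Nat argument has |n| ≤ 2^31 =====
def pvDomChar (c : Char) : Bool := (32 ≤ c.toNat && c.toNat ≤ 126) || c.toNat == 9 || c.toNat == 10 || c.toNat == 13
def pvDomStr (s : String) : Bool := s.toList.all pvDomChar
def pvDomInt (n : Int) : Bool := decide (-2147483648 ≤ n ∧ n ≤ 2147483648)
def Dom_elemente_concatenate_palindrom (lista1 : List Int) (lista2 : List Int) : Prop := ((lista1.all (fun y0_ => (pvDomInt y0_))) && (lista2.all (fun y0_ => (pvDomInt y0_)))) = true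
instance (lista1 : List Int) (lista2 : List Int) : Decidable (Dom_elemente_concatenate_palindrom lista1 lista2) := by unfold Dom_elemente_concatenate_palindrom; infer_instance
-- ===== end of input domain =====

-- B replaces the min-length index loop by a single zip pass and the string-reversal
-- palindrome test by an arithmetic digit-reversal loop (objective: alternative).

-- ===== PORT A =====
def concatenare_elemente (element1 : Int) (element2 : Int) : Option Int :=
  -- rezultat = str(element1) + str(element2); return int(rezultat)
  -- none is exactly where Python's int() raises ValueError; Pre_ excludes those inputs
  PySem.Int.ofChars? (PySem.Int.toChars element1 ++ PySem.Int.toChars element2)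

def is_palindrom (n : Int) : Bool :=
  let s := PySem.Int.toChars n                                  -- n = str(n)
  let oglindit := (PySem.List.slice? s none none (-1)).getD []  -- oglindit = n[::-1] (step -1 never fails)
  if s = oglindit then true else false

def elemente_concatenate_palindrom (lista1 : List Int) (lista2 : List Int) : List Int :=
  let dimensiune : Int :=
    if (lista1.length : Int) < (lista2.length : Int) then (lista1.length : Int) else (lista2.length : Int)
  (PySem.List.pyRange 0 dimensiune 1).foldl
    (fun rezultat pozitie =>
      -- lista[pozitie]: pozitie ∈ range(dimensiune) is always in range, so pyGetD is exact here
      match concatenare_elemente (PySem.List.pyGetD lista1 pozitie 0) (PySem.List.pyGetD lista2 pozitie 0) with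
      | none => rezultat   -- Python raises ValueError here; Pre_ excludes these inputs
      | some nr_concatenat =>
          if is_palindrom nr_concatenat then rezultat ++ [nr_concatenat] else rezultat)
    []

-- ===== PORT B =====
-- while m > 0: rev = rev * 10 + m % 10; m //= 10
def pvRevLoop (m : Int) (rev : Int) : Int :=
  if h : 0 < m then pvRevLoop (PySem.Int.floordiv m 10) (rev * 10 + PySem.Int.mod m 10) else rev
termination_by m.toNat
decreasing_by
  simp only [PySem.Int.floordiv, Int.fdiv_eq_ediv]
  omega

def elemente_concatenate_palindrom_alt (lista1 : List Int) (lista2 : List Int) : List Int :=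
  (lista1.zip lista2).foldl
    (fun rezultat p =>
      match PySem.Int.ofChars? (PySem.Int.toChars p.1 ++ PySem.Int.toChars p.2) with  -- n = int(str(e1) + str(e2))
      | none => rezultat   -- Python raises ValueError here; Pre_ excludes these inputs
      | some n =>
          if n < 0 then rezultat   -- continue: a negative number is never a palindrome
          else if pvRevLoop n 0 = n then rezultat ++ [n] else rezultat)
    []

-- ===== PRECONDITION & SPEC =====
-- Pre_ excludes exactly the inputs where Python A raises ValueError: a negative element of
-- lista2 at a paired position makes int(str(e1) + str(e2)) fail (a '-' inside the digits).
def Pre_elemente_concatenate_palindrom (lista1 : List Int) (lista2 : List Int) : Prop :=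
  ∀ x ∈ lista2.take lista1.length, 0 ≤ x
instance (lista1 : List Int) (lista2 : List Int) : Decidable (Pre_elemente_concatenate_palindrom lista1 lista2) := by
  unfold Pre_elemente_concatenate_palindrom; infer_instance

def pvWitness_elemente_concatenate_palindrom : List Int × List Int := ([12, 3, -7], [21, 4])

def Spec_elemente_concatenate_palindrom (lista1 : List Int) (lista2 : List Int) (out : List Int) : Prop :=
  out = elemente_concatenate_palindrom_alt lista1 lista2
instance (lista1 : List Int) (lista2 : List Int) (out : List Int) : Decidable (Spec_elemente_concatenate_palindrom lista1 lista2 out) := by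
  unfold Spec_elemente_concatenate_palindrom; infer_instance

-- ===== CLAIM (what is proved, stated in full; the proofs are below) =====
def Claim_equal_elemente_concatenate_palindrom : Prop := ∀ (lista1 : List Int) (lista2 : List Int), Dom_elemente_concatenate_palindrom lista1 lista2 → Pre_elemente_concatenate_palindrom lista1 lista2 → Spec_elemente_concatenate_palindrom lista1 lista2 (elemente_concatenate_palindrom lista1 lista2)

-- ===== LEMMAS AND PROOFS =====

-- Decimal string of a natural number, most significant digit first (what str() produces for n ≥ 0).
def pvStr (m : Nat) : List Char :=
  if m = 0 then ['0'] else ((Nat.digits 10 m).map Nat.digitChar).reverse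

theorem pvStr_ne_nil (m : Nat) : pvStr m ≠ [] := by
  unfold pvStr
  split
  · simp
  · simpa [Nat.digits_ne_nil_iff_ne_zero] using ‹m ≠ 0›

theorem pv_digitChar_ne_dash {d : Nat} (h : d < 10) : Nat.digitChar d ≠ '-' := by
  interval_cases d <;> decide

theorem pv_digitChar_inj {d e : Nat} (hd : d < 10) (he : e < 10)
    (h : Nat.digitChar d = Nat.digitChar e) : d = e := by
  interval_cases d <;> interval_cases e <;> simp_all <;> revert h <;> decide

theorem pv_mem_pvStr {c : Char} {m : Nat} (h : c ∈ pvStr m) : ∃ d, d < 10 ∧ c = Nat.digitChar d := by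
  unfold pvStr at h
  split at h
  · simp at h; exact ⟨0, by norm_num, by rw [h]; decide⟩
  · rw [List.mem_reverse, List.mem_map] at h
    obtain ⟨d, hd, rfl⟩ := h
    exact ⟨d, Nat.digits_lt_base (by norm_num) hd, rfl⟩

theorem pv_toDigitsCore_eq (f : Nat) : ∀ (n : Nat) (ds : List Char), n < f →
    Nat.toDigitsCore 10 f n ds = pvStr n ++ ds := by
  induction f with
  | zero => intro n ds h; omega
  | succ f ih =>
    intro n ds h
    rw [Nat.toDigitsCore]
    by_cases h0 : n = 0
    · subst h0; simp [pvStr]; decide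
    · have hpos : 0 < n := Nat.pos_of_ne_zero h0
      have hdig : Nat.digits 10 n = n % 10 :: Nat.digits 10 (n / 10) := Nat.digits_def' (by norm_num) hpos
      by_cases hq : n / 10 = 0
      · rw [if_pos hq]
        simp only [pvStr, if_neg h0, hdig, hq]
        simp
      · rw [if_neg hq]
        rw [ih (n / 10) _ (by omega)]
        simp only [pvStr, if_neg h0, if_neg hq, hdig]
        simp

theorem pv_toChars_nonneg (n : Int) (h : 0 ≤ n) : PySem.Int.toChars n = pvStr n.toNat := by
  rw [PySem.Int.toChars, if_neg (by omega)]
  rw [Nat.toDigits, pv_toDigitsCore_eq _ _ _ (by omega)]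
  simp

theorem pv_toChars_neg (n : Int) (h : n < 0) : PySem.Int.toChars n = '-' :: pvStr n.natAbs := by
  rw [PySem.Int.toChars, if_pos h]
  rw [Nat.toDigits, pv_toDigitsCore_eq _ _ _ (by omega)]
  simp

-- arithmetic digit reversal computed in Nat
theorem pv_revLoop_natCast (M A : Nat) :
    pvRevLoop (M : Int) (A : Int) =
      ((Nat.ofDigits 10 (Nat.digits 10 M).reverse + A * 10 ^ (Nat.digits 10 M).length : Nat) : Int) := by
  induction M using Nat.strong_induction_on generalizing A with
  | _ M ih =>
    rw [pvRevLoop]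
    by_cases h0 : M = 0
    · subst h0; simp
    · have hpos : (0:Int) < (M:Int) := by exact_mod_cast Nat.pos_of_ne_zero h0
      rw [dif_pos hpos]
      have hfd : PySem.Int.floordiv (M : Int) 10 = ((M / 10 : Nat) : Int) := by simp
      have hmd : PySem.Int.mod (M : Int) 10 = ((M % 10 : Nat) : Int) := by simp
      rw [hfd, hmd]
      have : (A : Int) * 10 + ((M % 10 : Nat) : Int) = ((A * 10 + M % 10 : Nat) : Int) := by push_cast; ring
      have hdig : Nat.digits 10 M = M % 10 :: Nat.digits 10 (M / 10) := Nat.digits_def' (by norm_num) (Nat.pos_of_ne_zero h0)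
      have hnat : Nat.ofDigits 10 (Nat.digits 10 (M/10)).reverse + (A*10 + M%10) * 10 ^ (Nat.digits 10 (M/10)).length
          = Nat.ofDigits 10 (Nat.digits 10 M).reverse + A * 10 ^ (Nat.digits 10 M).length := by
        rw [hdig]
        simp only [List.reverse_cons, Nat.ofDigits_append, Nat.ofDigits_singleton, List.length_cons, List.length_reverse, pow_succ]
        ring
      rw [this, ih (M / 10) (by omega), hnat]

-- reversing the digits is the identity exactly on digit palindromes
theorem pv_ofDigits_reverse_eq_iff (N : Nat) :
    Nat.ofDigits 10 (Nat.digits 10 N).reverse = N ↔ (Nat.digits 10 N).reverse = Nat.digits 10 N := by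
  constructor
  · intro h
    by_cases h0 : N = 0
    · subst h0; simp
    · have hne : Nat.digits 10 N ≠ [] := Nat.digits_ne_nil_iff_ne_zero.mpr h0
      obtain ⟨a, T, hL⟩ : ∃ a T, Nat.digits 10 N = a :: T := by
        cases hcase : Nat.digits 10 N with
        | nil => exact absurd hcase hne
        | cons a T => exact ⟨a, T, rfl⟩
      have hlt : ∀ d ∈ Nat.digits 10 N, d < 10 := fun d hd => Nat.digits_lt_base (by norm_num) hd
      have ha : a ≠ 0 := by
        intro ha0
        -- a leading zero: the reversed digit string would denote a number < 10^|T| ≤ N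
        have hrev : (Nat.digits 10 N).reverse = T.reverse ++ [a] := by rw [hL]; simp
        have hlt' : Nat.ofDigits 10 T.reverse < 10 ^ T.reverse.length :=
          Nat.ofDigits_lt_base_pow_length (by norm_num)
            (fun x hx => hlt x (by rw [hL]; exact List.mem_cons_of_mem _ (List.mem_reverse.mp hx)))
        have hval : Nat.ofDigits 10 (Nat.digits 10 N).reverse = Nat.ofDigits 10 T.reverse := by
          rw [hrev, Nat.ofDigits_append, ha0]; simp
        have hlen : (Nat.digits 10 N).length = T.length + 1 := by rw [hL]; simp
        have hpow : 10 ^ T.length ≤ N := by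
          have := Nat.base_pow_length_digits_le 10 N (by norm_num) h0
          rw [hlen] at this
          have h2 : 10 ^ (T.length + 1) ≤ 10 * N := this
          rw [pow_succ] at h2
          omega
        rw [hval] at h
        rw [List.length_reverse] at hlt'
        omega
      have := Nat.digits_ofDigits 10 (by norm_num) (Nat.digits 10 N).reverse
        (fun d hd => hlt d (List.mem_reverse.mp hd))
        (fun hne' => by
          have h1 : (Nat.digits 10 N).reverse.getLast? = some a := by
            rw [hL, List.reverse_cons]; exact List.getLast?_concat
          have h2 : (Nat.digits 10 N).reverse.getLast? = some ((Nat.digits 10 N).reverse.getLast hne') :=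
            List.getLast?_eq_some_getLast hne'
          have h3 : (Nat.digits 10 N).reverse.getLast hne' = a := by
            rw [h1] at h2; exact (Option.some.inj h2).symm
          rw [h3]; exact ha)
      rw [h] at this
      conv_lhs => rw [← this]
  · intro h; rw [h]; exact Nat.ofDigits_digits 10 N

theorem pv_map_digitChar_inj : ∀ {L1 L2 : List Nat}, (∀ d ∈ L1, d < 10) → (∀ d ∈ L2, d < 10) →
    L1.map Nat.digitChar = L2.map Nat.digitChar → L1 = L2 := by
  intro L1
  induction L1 with
  | nil => intro L2 _ _ h; cases L2 <;> simp_all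
  | cons a T ih =>
    intro L2 h1 h2 h
    cases L2 with
    | nil => simp_all
    | cons b S =>
      simp only [List.map_cons, List.cons.injEq] at h
      have hab : a = b := pv_digitChar_inj (h1 a (by simp)) (h2 b (by simp)) h.1
      have : T = S := ih (fun d hd => h1 d (by simp [hd])) (fun d hd => h2 d (by simp [hd])) h.2
      rw [hab, this]

theorem pv_pvStr_palindrome_iff (N : Nat) :
    (pvStr N = (pvStr N).reverse) ↔ (Nat.digits 10 N).reverse = Nat.digits 10 N := by
  by_cases h0 : N = 0
  · subst h0; simp [pvStr]
  · have hlt : ∀ d ∈ Nat.digits 10 N, d < 10 := fun d hd => Nat.digits_lt_base (by norm_num) hd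
    rw [pvStr, if_neg h0, List.reverse_reverse, ← List.map_reverse]
    constructor
    · intro h
      exact pv_map_digitChar_inj (fun d hd => hlt d (List.mem_reverse.mp hd)) hlt h
    · intro h; rw [h]

theorem pv_is_palindrom_eq (n : Int) :
    is_palindrom n = if PySem.Int.toChars n = (PySem.Int.toChars n).reverse then true else false := by
  simp only [is_palindrom, PySem.List.slice?_none_none_neg_one, Option.getD_some]

theorem pv_is_palindrom_neg {n : Int} (h : n < 0) : is_palindrom n = false := by
  rw [pv_is_palindrom_eq, pv_toChars_neg n h]
  rw [if_neg]
  intro heq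
  cases hu : pvStr n.natAbs with
  | nil => exact pvStr_ne_nil _ hu
  | cons v vs =>
    rw [hu] at heq
    have hlast : ('-' :: v :: vs).getLast? = ('-' :: v :: vs).reverse.head? := List.head?_reverse.symm
    rw [← heq] at hlast
    simp only [List.getLast?_cons_cons, List.head?_cons] at hlast
    have hmem : '-' ∈ v :: vs := List.mem_of_mem_getLast? (by rw [hlast]; simp)
    rw [← hu] at hmem
    obtain ⟨d, hd, hc⟩ := pv_mem_pvStr hmem
    exact pv_digitChar_ne_dash hd hc.symm

theorem pv_is_palindrom_nonneg {n : Int} (h : 0 ≤ n) :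
    is_palindrom n = true ↔ pvRevLoop n 0 = n := by
  have hn : n = ((n.toNat : Nat) : Int) := by omega
  rw [pv_is_palindrom_eq, pv_toChars_nonneg n h]
  constructor
  · intro hpal
    have h1 : pvStr n.toNat = (pvStr n.toNat).reverse := by
      by_cases hc : pvStr n.toNat = (pvStr n.toNat).reverse
      · exact hc
      · rw [if_neg hc] at hpal; cases hpal
    have h2 := (pv_pvStr_palindrome_iff n.toNat).mp h1
    have h3 := (pv_ofDigits_reverse_eq_iff n.toNat).mpr h2
    rw [hn]
    calc pvRevLoop ((n.toNat : Nat) : Int) ((0:Nat) : Int)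
        = ((Nat.ofDigits 10 (Nat.digits 10 n.toNat).reverse + 0 * 10 ^ (Nat.digits 10 n.toNat).length : Nat) : Int) := pv_revLoop_natCast _ _
      _ = ((n.toNat : Nat) : Int) := by rw [Nat.zero_mul, Nat.add_zero, h3]
  · intro hrev
    rw [hn] at hrev
    have h1 : pvRevLoop ((n.toNat : Nat) : Int) ((0:Nat) : Int) = ((n.toNat : Nat) : Int) := hrev
    rw [pv_revLoop_natCast] at h1
    have h2 : Nat.ofDigits 10 (Nat.digits 10 n.toNat).reverse = n.toNat := by
      have := h1
      simp only [Nat.zero_mul, Nat.add_zero] at this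
      exact_mod_cast this
    have h3 := (pv_ofDigits_reverse_eq_iff n.toNat).mp h2
    rw [if_pos ((pv_pvStr_palindrome_iff n.toNat).mpr h3)]

-- the two loop bodies agree on every pair
theorem pv_step_eq (r : List Int) (p : Int × Int) :
    (match concatenare_elemente p.1 p.2 with
      | none => r
      | some nr => if is_palindrom nr then r ++ [nr] else r) =
    (match PySem.Int.ofChars? (PySem.Int.toChars p.1 ++ PySem.Int.toChars p.2) with
      | none => r
      | some n => if n < 0 then r else if pvRevLoop n 0 = n then r ++ [n] else r) := by
  unfold concatenare_elemente
  cases hp : PySem.Int.ofChars? (PySem.Int.toChars p.1 ++ PySem.Int.toChars p.2) with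
  | none => rfl
  | some n =>
    simp only
    rcases lt_or_ge n 0 with hneg | hpos
    · rw [if_pos hneg, pv_is_palindrom_neg hneg]
      simp
    · rw [if_neg (not_lt.mpr hpos)]
      by_cases hr : pvRevLoop n 0 = n
      · rw [if_pos hr, if_pos ((pv_is_palindrom_nonneg hpos).mpr hr)]
      · rw [if_neg hr, if_neg]
        intro hc
        exact hr ((pv_is_palindrom_nonneg hpos).mp hc)

-- the index loop over range(min(len, len)) is one pass over zip
theorem pv_range_fold_eq_zip_fold (step : List Int → Int → Int → List Int) :
    ∀ (l1 l2 : List Int) (acc : List Int),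
      (List.range (min l1.length l2.length)).foldl
        (fun r i => step r (l1.getD i 0) (l2.getD i 0)) acc =
      (l1.zip l2).foldl (fun r p => step r p.1 p.2) acc := by
  intro l1
  induction l1 with
  | nil => intro l2 acc; simp
  | cons x xs ih =>
    intro l2 acc
    cases l2 with
    | nil => simp
    | cons y ys =>
      simp only [List.length_cons, List.zip_cons_cons, List.foldl_cons]
      have hmin : min (xs.length + 1) (ys.length + 1) = min xs.length ys.length + 1 := by omega
      rw [hmin, List.range_succ_eq_map, List.foldl_cons, List.foldl_map]
      simp only [List.getD_cons_zero, List.getD_cons_succ]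
      exact ih ys (step acc x y)

theorem pv_main_eq (lista1 lista2 : List Int) :
    elemente_concatenate_palindrom lista1 lista2 = elemente_concatenate_palindrom_alt lista1 lista2 := by
  have hA : elemente_concatenate_palindrom lista1 lista2 =
      (PySem.List.pyRange 0 (if (lista1.length : Int) < (lista2.length : Int) then (lista1.length : Int) else (lista2.length : Int)) 1).foldl
        (fun rezultat pozitie =>
          match concatenare_elemente (PySem.List.pyGetD lista1 pozitie 0) (PySem.List.pyGetD lista2 pozitie 0) with
          | none => rezultat
          | some nr_concatenat =>
              if is_palindrom nr_concatenat then rezultat ++ [nr_concatenat] else rezultat)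
        [] := rfl
  rw [hA]
  unfold elemente_concatenate_palindrom_alt
  have hdim : (if (lista1.length : Int) < (lista2.length : Int) then (lista1.length : Int) else (lista2.length : Int))
      = ((min lista1.length lista2.length : Nat) : Int) := by
    split_ifs with h
    · have : lista1.length < lista2.length := by exact_mod_cast h
      simp [Nat.min_eq_left (Nat.le_of_lt this)]
    · have : lista2.length ≤ lista1.length := by exact_mod_cast not_lt.mp h
      simp [Nat.min_eq_right this]
  rw [hdim, PySem.List.pyRange_one]
  simp only [Int.sub_zero, Int.toNat_natCast, List.foldl_map, zero_add, PySem.List.pyGetD_natCast]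
  rw [pv_range_fold_eq_zip_fold
    (fun r a b => match concatenare_elemente a b with
      | none => r
      | some nr => if is_palindrom nr then r ++ [nr] else r) lista1 lista2 []]
  have hstep : (fun (r : List Int) (p : Int × Int) =>
      match concatenare_elemente p.1 p.2 with
      | none => r
      | some nr => if is_palindrom nr then r ++ [nr] else r) =
      (fun (r : List Int) (p : Int × Int) =>
        match PySem.Int.ofChars? (PySem.Int.toChars p.1 ++ PySem.Int.toChars p.2) with
        | none => r
        | some n => if n < 0 then r else if pvRevLoop n 0 = n then r ++ [n] else r) :=
    funext fun r => funext fun p => pv_step_eq r p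
  rw [hstep]

-- ===== VERDICT (by name: the statement is the Claim_ definition above) =====
theorem elemente_concatenate_palindrom_spec : Claim_equal_elemente_concatenate_palindrom := by
  intro lista1 lista2 _hdom _hpre
  unfold Spec_elemente_concatenate_palindrom
  exact pv_main_eq lista1 lista2
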